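-- pv_equiv track=rewrite | github.com/lfcounago/aoc-2023 | day7/day7.py | encontrar_todas_combinaciones
-- ===== SOURCE A (Python) =====
-- def encontrar_todas_combinaciones(mano):
--     if not mano:
--         return [""]
--
--     carta_actual = mano[0]
--     if carta_actual == 'J':
--         valores_posibles = "23456789TQKA"
--     else:
--         valores_posibles = carta_actual
--
--     combinaciones = [
--         primera_mitad + segunda_mitad
--         for primera_mitad in valores_posibles
--         for segunda_mitad in encontrar_todas_combinaciones(mano[1:])
--     ]
--
--     return combinaciones
-- ===== SOURCE B (Python) =====
-- def encontrar_todas_combinaciones(mano):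
--     opciones = ["23456789TQKA" if carta == 'J' else carta for carta in mano]
--     combinaciones = [""]
--     for opcion in opciones:
--         combinaciones = [prefijo + carta for prefijo in combinaciones for carta in opcion]
--     return combinaciones
-- ===== Notes on version B (the rewrite author's own statement) =====
-- stated objective: faster
-- what changed: Replaces the head-recursion over the tail with a precomputed per-position option table and a single iterative left-fold product that extends prefixes in place.
import Mathlib
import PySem

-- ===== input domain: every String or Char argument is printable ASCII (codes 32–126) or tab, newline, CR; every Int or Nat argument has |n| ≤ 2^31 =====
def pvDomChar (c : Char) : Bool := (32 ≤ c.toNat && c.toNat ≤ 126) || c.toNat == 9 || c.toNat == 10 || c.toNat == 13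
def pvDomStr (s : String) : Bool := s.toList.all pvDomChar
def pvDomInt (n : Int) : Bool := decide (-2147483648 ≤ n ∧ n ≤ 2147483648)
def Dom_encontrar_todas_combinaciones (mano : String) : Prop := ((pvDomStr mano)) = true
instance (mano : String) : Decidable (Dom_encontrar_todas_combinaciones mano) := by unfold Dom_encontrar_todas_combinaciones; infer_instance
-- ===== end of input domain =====

-- B replaces A's recursion over the tail by a per-position option table folded into an iterative product; return value only, same result.
-- ===== PORT A =====
-- recursion on the hand's character list: mano[0] / mano[1:] of A's code
def pvCombA : List Char → List String
  | [] => [""]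
  | carta_actual :: rest =>
      let valores_posibles : List Char :=
        if carta_actual = 'J' then "23456789TQKA".toList else [carta_actual]
      valores_posibles.flatMap (fun primera_mitad =>
        (pvCombA rest).map (fun segunda_mitad =>
          String.ofList (primera_mitad :: segunda_mitad.toList)))

def encontrar_todas_combinaciones (mano : String) : List String :=
  pvCombA mano.toList

-- ===== PORT B =====
def encontrar_todas_combinaciones_alt (mano : String) : List String :=
  let opciones : List (List Char) :=
    mano.toList.map (fun carta => if carta = 'J' then "23456789TQKA".toList else [carta])
  (opciones.foldl
      (fun combinaciones opcion =>
        combinaciones.flatMap (fun prefijo => opcion.map (fun carta => prefijo ++ [carta])))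
      [[]]).map String.ofList

-- ===== PRECONDITION & SPEC =====
def Spec_encontrar_todas_combinaciones (mano : String) (out : List String) : Prop := out = encontrar_todas_combinaciones_alt mano
instance (mano : String) (out : List String) : Decidable (Spec_encontrar_todas_combinaciones mano out) := by unfold Spec_encontrar_todas_combinaciones; infer_instance

-- ===== CLAIM (what is proved, stated in full; the proofs are below) =====
def Claim_equal_encontrar_todas_combinaciones : Prop := ∀ (mano : String), Dom_encontrar_todas_combinaciones mano → Spec_encontrar_todas_combinaciones mano (encontrar_todas_combinaciones mano)

-- ===== LEMMAS AND PROOFS =====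
-- product of the remaining option lists, built front-first (mirrors A's recursion shape)
def pvProd : List (List Char) → List (List Char)
  | [] => [[]]
  | o :: rest => o.flatMap (fun c => (pvProd rest).map (fun t => c :: t))

theorem pvProd_foldl (l : List (List Char)) (acc : List (List Char)) :
    l.foldl
      (fun combinaciones opcion =>
        combinaciones.flatMap (fun prefijo => opcion.map (fun carta => prefijo ++ [carta])))
      acc
    = acc.flatMap (fun p => (pvProd l).map (fun t => p ++ t)) := by
  induction l generalizing acc with
  | nil => simp [pvProd]
  | cons o rest ih =>
      rw [List.foldl_cons, ih]
      simp [pvProd, List.map_flatMap, List.map_map, Function.comp_def, List.flatMap_assoc,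
        List.flatMap_map, List.append_assoc]

theorem pvCombA_eq (l : List Char) :
    pvCombA l
      = (pvProd (l.map (fun carta => if carta = 'J' then "23456789TQKA".toList else [carta]))).map
          String.ofList := by
  induction l with
  | nil => simp [pvCombA, pvProd]
  | cons c rest ih =>
      simp [pvCombA, pvProd, ih, List.map_flatMap, List.map_map, Function.comp_def,
        String.toList_ofList]

-- ===== VERDICT (by name: the statement is the Claim_ definition above) =====
theorem encontrar_todas_combinaciones_spec : Claim_equal_encontrar_todas_combinaciones := by
  intro mano _
  unfold Spec_encontrar_todas_combinaciones encontrar_todas_combinaciones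
    encontrar_todas_combinaciones_alt
  rw [pvCombA_eq]
  simp only [pvProd_foldl]
  simp
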